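-- pv_equiv track=rewrite | github.com/CommonSenseMachines/3devals | leaderboard/llm_prompts.py | create_hybrid_view_images_section
-- ===== SOURCE A (Python) =====
-- from typing import Dict, List, Any, Optional
--
-- def create_hybrid_view_images_section(render_images: Dict[str, str]) -> str:
--     """Create the view images section specifically for hybrid approach (CSM + 3D mesh views)"""
--     sections = []
--
--     # Group by image type for better organization
--     csm_renders = []
--     mesh_views = []
--     other_views = []
--
--     for view_name in render_images.keys():
--         if view_name == "csm_render":
--             csm_renders.append(view_name)
--         elif view_name.startswith("mesh_"):
--             mesh_views.append(view_name)
--         else: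
--             other_views.append(view_name)
--
--     # Add CSM renders first
--     for view_name in csm_renders:
--         sections.append(f"CSM PRE-RENDERED VIEW:\n[{view_name.upper()}_IMAGE]\n(This is CSM's original rendered view of the 3D model)")
--
--     # Add 3D mesh views
--     for view_name in sorted(mesh_views):  # Sort for consistent ordering
--         clean_view = view_name.replace("mesh_", "")
--         sections.append(f"3D MESH {clean_view.upper()} VIEW:\n[{view_name.upper()}_IMAGE]\n(Rendered from the actual 3D mesh file using Blender)")
--
--     # Add any other views
--     for view_name in other_views:
--         sections.append(f"ADDITIONAL VIEW ({view_name.upper()}):\n[{view_name.upper()}_IMAGE]")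
--
--     return "\n\n".join(sections)
-- ===== SOURCE B (Python) =====
-- def create_hybrid_view_images_section(render_images):
--     """Single stable sort by a composite (group, name) key, then one emission pass."""
--     def order_key(view_name):
--         if view_name == "csm_render":
--             return (0, "")
--         if view_name.startswith("mesh_"):
--             return (1, view_name)
--         return (2, "")
--
--     def render_block(view_name):
--         if view_name == "csm_render":
--             return f"CSM PRE-RENDERED VIEW:\n[{view_name.upper()}_IMAGE]\n(This is CSM's original rendered view of the 3D model)"
--         if view_name.startswith("mesh_"):
--             clean_view = view_name.replace("mesh_", "")
--             return f"3D MESH {clean_view.upper()} VIEW:\n[{view_name.upper()}_IMAGE]\n(Rendered from the actual 3D mesh file using Blender)"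
--         return f"ADDITIONAL VIEW ({view_name.upper()}):\n[{view_name.upper()}_IMAGE]"
--
--     return "\n\n".join(render_block(v) for v in sorted(render_images.keys(), key=order_key))
-- ===== Notes on version B (the rewrite author's own statement) =====
-- stated objective: alternative
-- what changed: Replaces A's three-bucket partition followed by three separate emission loops with one stable sort by a composite (group, name) key and a single emission pass joined at the end.
import Mathlib
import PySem

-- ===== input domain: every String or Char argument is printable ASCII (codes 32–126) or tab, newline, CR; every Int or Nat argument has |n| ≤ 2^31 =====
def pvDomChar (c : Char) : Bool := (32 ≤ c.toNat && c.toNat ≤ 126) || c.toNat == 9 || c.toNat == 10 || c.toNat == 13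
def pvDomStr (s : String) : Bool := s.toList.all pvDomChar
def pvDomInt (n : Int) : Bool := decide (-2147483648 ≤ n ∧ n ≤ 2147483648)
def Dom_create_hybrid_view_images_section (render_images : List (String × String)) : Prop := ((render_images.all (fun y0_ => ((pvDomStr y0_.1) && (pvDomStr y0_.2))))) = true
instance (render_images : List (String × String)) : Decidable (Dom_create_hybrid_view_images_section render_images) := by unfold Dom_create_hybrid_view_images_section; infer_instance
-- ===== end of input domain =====

-- B replaces A's three-bucket partition followed by three emission loops with one stable
-- sort on a composite (group, name) key and a single emission pass (objective: alternative).

-- shared formatters: the three f-string bodies, textually identical in both Pythons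
def fmt_csm (v : String) : String :=
  "CSM PRE-RENDERED VIEW:\n[" ++ PySem.Str.upper v ++ "_IMAGE]\n(This is CSM's original rendered view of the 3D model)"

def fmt_mesh (v : String) : String :=
  let clean_view := PySem.Str.replace v "mesh_" ""
  "3D MESH " ++ PySem.Str.upper clean_view ++ " VIEW:\n[" ++ PySem.Str.upper v ++ "_IMAGE]\n(Rendered from the actual 3D mesh file using Blender)"

def fmt_other (v : String) : String :=
  "ADDITIONAL VIEW (" ++ PySem.Str.upper v ++ "):\n[" ++ PySem.Str.upper v ++ "_IMAGE]"

-- ===== PORT A =====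
def create_hybrid_view_images_section (render_images : List (String × String)) : String :=
  let keys := (PySem.Dict.ofList render_images).keys
  -- grouping loop: three append-accumulators csm_renders / mesh_views / other_views
  let g := keys.foldl (fun acc v =>
      if v == "csm_render" then (acc.1 ++ [v], acc.2.1, acc.2.2)
      else if PySem.Str.startswith v "mesh_" then (acc.1, acc.2.1 ++ [v], acc.2.2)
      else (acc.1, acc.2.1, acc.2.2 ++ [v]))
    (([] : List String), ([] : List String), ([] : List String))
  let sections := g.1.foldl (fun acc v => acc ++ [fmt_csm v]) []
  let sections := (PySem.List.sorted g.2.1 (fun v => v)).foldl (fun acc v => acc ++ [fmt_mesh v]) sections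
  let sections := g.2.2.foldl (fun acc v => acc ++ [fmt_other v]) sections
  PySem.Str.join "\n\n" sections

-- ===== PORT B =====
-- order_key's two tuple components (sorted(key=order_key) is PySem.List.sorted2)
def order_key1 (v : String) : Int :=
  if v == "csm_render" then 0
  else if PySem.Str.startswith v "mesh_" then 1
  else 2

def order_key2 (v : String) : String :=
  if v == "csm_render" then ""
  else if PySem.Str.startswith v "mesh_" then v
  else ""

def render_block (v : String) : String :=
  if v == "csm_render" then fmt_csm v
  else if PySem.Str.startswith v "mesh_" then fmt_mesh v
  else fmt_other v

def create_hybrid_view_images_section_alt (render_images : List (String × String)) : String :=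
  PySem.Str.join "\n\n"
    ((PySem.List.sorted2 ((PySem.Dict.ofList render_images).keys) order_key1 order_key2).map render_block)

-- ===== PRECONDITION & SPEC =====
def Spec_create_hybrid_view_images_section (render_images : List (String × String)) (out : String) : Prop := out = create_hybrid_view_images_section_alt render_images
instance (render_images : List (String × String)) (out : String) : Decidable (Spec_create_hybrid_view_images_section render_images out) := by unfold Spec_create_hybrid_view_images_section; infer_instance

-- ===== CLAIM (what is proved, stated in full; the proofs are below) =====
def Claim_equal_create_hybrid_view_images_section : Prop := ∀ (render_images : List (String × String)), Dom_create_hybrid_view_images_section render_images → Spec_create_hybrid_view_images_section render_images (create_hybrid_view_images_section render_images)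

-- ===== LEMMAS AND PROOFS =====

-- the three branch predicates of A's grouping loop
def pvP0 (v : String) : Bool := v == "csm_render"
def pvP1 (v : String) : Bool := !pvP0 v && PySem.Str.startswith v "mesh_"
def pvP2 (v : String) : Bool := !pvP0 v && !PySem.Str.startswith v "mesh_"

-- sorted2's comparator, named
def pvBefore (a b : String) : Bool :=
  decide (order_key1 a < order_key1 b) ||
    (!decide (order_key1 b < order_key1 a) && decide (order_key2 a < order_key2 b))

def pvLt (a b : String) : Bool := decide (a < b)

lemma sorted2_eq_foldl (xs : List String) :
    PySem.List.sorted2 xs order_key1 order_key2 =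
      xs.foldl (fun acc x => PySem.List.insertBy pvBefore x acc) [] := rfl

lemma keys_of_p0 {v : String} (h : pvP0 v = true) :
    order_key1 v = 0 ∧ order_key2 v = "" := by
  simp [pvP0] at h; simp [order_key1, order_key2, h]

lemma keys_of_p1 {v : String} (h : pvP1 v = true) :
    order_key1 v = 1 ∧ order_key2 v = v := by
  simp [pvP1, pvP0] at h
  simp [order_key1, order_key2, h.1, h.2]

lemma keys_of_p2 {v : String} (h : pvP2 v = true) :
    order_key1 v = 2 ∧ order_key2 v = "" := by
  simp [pvP2, pvP0] at h
  simp [order_key1, order_key2, h.1, h.2]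

lemma before_eval (x y : String) {a b : Int} {sa sb : String}
    (h1 : order_key1 x = a) (h2 : order_key2 x = sa)
    (h3 : order_key1 y = b) (h4 : order_key2 y = sb) :
    pvBefore x y = (decide (a < b) || (!decide (b < a) && decide (sa < sb))) := by
  unfold pvBefore; rw [h1, h2, h3, h4]

lemma key1_nonneg (x : String) : 0 ≤ order_key1 x := by
  unfold order_key1; split_ifs <;> norm_num

-- any element is inserted past the whole csm prefix
lemma before_to_c (x y : String) (hy : pvP0 y = true) : pvBefore x y = false := by
  rw [before_eval x y rfl rfl (keys_of_p0 hy).1 (keys_of_p0 hy).2]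
  simp [decide_eq_false (not_lt.mpr (key1_nonneg x))]

lemma insertBy_skip (before : String → String → Bool) (x : String) (P R : List String)
    (h : ∀ y ∈ P, before x y = false) :
    PySem.List.insertBy before x (P ++ R) = P ++ PySem.List.insertBy before x R := by
  induction P with
  | nil => rfl
  | cons p ps ih =>
    simp only [List.cons_append, PySem.List.insertBy, h p (by simp)]
    simp only [Bool.false_eq_true, if_false, List.cons.injEq, true_and]
    exact ih (fun y hy => h y (by simp [hy]))

-- inserting a csm element past mesh ++ other
lemma insert_c0 (x : String) (hx : pvP0 x = true) (M O : List String)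
    (hM : ∀ y ∈ M, pvP1 y = true) (hO : ∀ y ∈ O, pvP2 y = true) :
    PySem.List.insertBy pvBefore x (M ++ O) = x :: (M ++ O) := by
  cases M with
  | nil =>
    cases O with
    | nil => rfl
    | cons o os =>
      have hb : pvBefore x o = true := by
        rw [before_eval x o (keys_of_p0 hx).1 (keys_of_p0 hx).2
          (keys_of_p2 (hO o (by simp))).1 (keys_of_p2 (hO o (by simp))).2]
        simp
      simp [PySem.List.insertBy, hb]
  | cons m ms =>
    have hb : pvBefore x m = true := by
      rw [before_eval x m (keys_of_p0 hx).1 (keys_of_p0 hx).2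
        (keys_of_p1 (hM m (by simp))).1 (keys_of_p1 (hM m (by simp))).2]
      simp
    simp [PySem.List.insertBy, hb]

-- inserting a mesh element into mesh ++ other is the plain insertion into mesh
lemma insert_c1 (x : String) (hx : pvP1 x = true) :
    ∀ (M O : List String), (∀ y ∈ M, pvP1 y = true) → (∀ y ∈ O, pvP2 y = true) →
    PySem.List.insertBy pvBefore x (M ++ O) = PySem.List.insertBy pvLt x M ++ O := by
  intro M
  induction M with
  | nil =>
    intro O _ hO
    cases O with
    | nil => rfl
    | cons o os =>
      have hb : pvBefore x o = true := by
        rw [before_eval x o (keys_of_p1 hx).1 (keys_of_p1 hx).2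
          (keys_of_p2 (hO o (by simp))).1 (keys_of_p2 (hO o (by simp))).2]
        simp
      simp [PySem.List.insertBy, hb]
  | cons m ms ih =>
    intro O hM hO
    have hb : pvBefore x m = pvLt x m := by
      rw [before_eval x m (keys_of_p1 hx).1 (keys_of_p1 hx).2
        (keys_of_p1 (hM m (by simp))).1 (keys_of_p1 (hM m (by simp))).2]
      simp [pvLt]
    cases h : pvLt x m with
    | true => simp [PySem.List.insertBy, hb, h]
    | false =>
      simp only [List.cons_append, PySem.List.insertBy, hb, h, Bool.false_eq_true, if_false]
      simp only [List.cons.injEq, true_and]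
      exact ih O (fun y hy => hM y (by simp [hy])) hO

-- inserting an other element lands at the very end
lemma insert_c2 (x : String) (hx : pvP2 x = true) (M O : List String)
    (hM : ∀ y ∈ M, pvP1 y = true) (hO : ∀ y ∈ O, pvP2 y = true) :
    PySem.List.insertBy pvBefore x (M ++ O) = M ++ (O ++ [x]) := by
  have hskip : ∀ y ∈ M, pvBefore x y = false := by
    intro y hy
    rw [before_eval x y (keys_of_p2 hx).1 (keys_of_p2 hx).2
      (keys_of_p1 (hM y hy)).1 (keys_of_p1 (hM y hy)).2]
    simp
  rw [insertBy_skip pvBefore x M O hskip]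
  congr 1
  apply PySem.List.insertBy_of_forall_not_before
  intro y hy
  rw [before_eval x y (keys_of_p2 hx).1 (keys_of_p2 hx).2
    (keys_of_p2 (hO y hy)).1 (keys_of_p2 (hO y hy)).2]
  simp

-- the whole sorting fold, decomposed into the three groups
lemma fold_decomp (ks : List String) :
    ∀ (C M O : List String), (∀ y ∈ C, pvP0 y = true) → (∀ y ∈ M, pvP1 y = true) →
    (∀ y ∈ O, pvP2 y = true) →
    ks.foldl (fun acc x => PySem.List.insertBy pvBefore x acc) (C ++ (M ++ O))
      = (C ++ ks.filter pvP0) ++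
        (((ks.filter pvP1).foldl (fun acc x => PySem.List.insertBy pvLt x acc) M) ++
          (O ++ ks.filter pvP2)) := by
  induction ks with
  | nil => intro C M O _ _ _; simp
  | cons x t ih =>
    intro C M O hC hM hO
    rw [List.foldl_cons, List.filter_cons, List.filter_cons, List.filter_cons]
    have hCb : ∀ y ∈ C, pvBefore x y = false := fun y hy => before_to_c x y (hC y hy)
    rw [insertBy_skip pvBefore x C (M ++ O) hCb]
    by_cases h0 : (x == "csm_render") = true
    · have e0 : pvP0 x = true := h0
      have e1 : pvP1 x = false := by unfold pvP1 pvP0; rw [h0]; simp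
      have e2 : pvP2 x = false := by unfold pvP2 pvP0; rw [h0]; simp
      rw [insert_c0 x e0 M O hM hO]
      have : C ++ (x :: (M ++ O)) = (C ++ [x]) ++ (M ++ O) := by simp
      rw [this, ih (C ++ [x]) M O
        (by intro y hy; rcases List.mem_append.mp hy with h | h
            · exact hC y h
            · simp at h; subst h; exact e0) hM hO]
      simp [e0, e1, e2]
    · by_cases hs : PySem.Str.startswith x "mesh_" = true
      · have h0f : (x == "csm_render") = false := by revert h0; cases x == "csm_render" <;> simp
        have e0 : pvP0 x = false := h0f
        have e1 : pvP1 x = true := by unfold pvP1 pvP0; rw [h0f, hs]; rfl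
        have e2 : pvP2 x = false := by unfold pvP2 pvP0; rw [h0f, hs]; simp
        rw [insert_c1 x e1 M O hM hO]
        have : C ++ (PySem.List.insertBy pvLt x M ++ O) =
            C ++ ((PySem.List.insertBy pvLt x M) ++ (O ++ [])) := by simp
        rw [this, ih C (PySem.List.insertBy pvLt x M) (O ++ [])
          hC
          (by intro y hy; rcases (PySem.List.mem_insertBy pvLt x y M).mp hy with h | h
              · subst h; exact e1
              · exact hM y h)
          (by simpa using hO)]
        simp [e0, e1, e2]
      · have h0f : (x == "csm_render") = false := by revert h0; cases x == "csm_render" <;> simp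
        have hsf : PySem.Str.startswith x "mesh_" = false := by revert hs; cases PySem.Str.startswith x "mesh_" <;> simp
        have e0 : pvP0 x = false := h0f
        have e1 : pvP1 x = false := by unfold pvP1 pvP0; rw [h0f, hsf]; simp
        have e2 : pvP2 x = true := by unfold pvP2 pvP0; rw [h0f, hsf]; rfl
        rw [insert_c2 x e2 M O hM hO]
        rw [ih C M (O ++ [x]) hC hM
          (by intro y hy; rcases List.mem_append.mp hy with h | h
              · exact hO y h
              · simp at h; subst h; exact e2)]
        simp [e0, e1, e2]

lemma sorted2_decomp (ks : List String) :
    PySem.List.sorted2 ks order_key1 order_key2 =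
      ks.filter pvP0 ++ (PySem.List.sorted (ks.filter pvP1) (fun v => v) ++ ks.filter pvP2) := by
  rw [sorted2_eq_foldl, PySem.List.sorted_eq_foldl_insertBy]
  have h := fold_decomp ks [] [] [] (by simp) (by simp) (by simp)
  simp only [List.nil_append, List.append_nil] at h
  exact h

-- A's grouping loop computes the three filters
lemma partition_fold (ks : List String) :
    ∀ (a b c : List String),
    ks.foldl (fun acc v =>
      if v == "csm_render" then (acc.1 ++ [v], acc.2.1, acc.2.2)
      else if PySem.Str.startswith v "mesh_" then (acc.1, acc.2.1 ++ [v], acc.2.2)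
      else (acc.1, acc.2.1, acc.2.2 ++ [v])) (a, b, c)
    = (a ++ ks.filter pvP0, b ++ ks.filter pvP1, c ++ ks.filter pvP2) := by
  induction ks with
  | nil => intro a b c; simp
  | cons v t ih =>
    intro a b c
    rw [List.foldl_cons, List.filter_cons, List.filter_cons, List.filter_cons]
    by_cases h0 : (v == "csm_render") = true
    · have e0 : pvP0 v = true := h0
      have e1 : pvP1 v = false := by unfold pvP1 pvP0; rw [h0]; simp
      have e2 : pvP2 v = false := by unfold pvP2 pvP0; rw [h0]; simp
      simp only [h0, if_true, ih, e0, e1, e2, if_false, Bool.false_eq_true, List.append_assoc,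
        List.singleton_append]
    · by_cases hs : PySem.Str.startswith v "mesh_" = true
      · have h0f : (v == "csm_render") = false := by revert h0; cases v == "csm_render" <;> simp
        have e0 : pvP0 v = false := h0f
        have e1 : pvP1 v = true := by unfold pvP1 pvP0; rw [h0f, hs]; rfl
        have e2 : pvP2 v = false := by unfold pvP2 pvP0; rw [h0f, hs]; simp
        simp only [h0, hs, if_true, if_false, Bool.false_eq_true, ih, e0, e1, e2,
          List.append_assoc, List.singleton_append]
      · have h0f : (v == "csm_render") = false := by revert h0; cases v == "csm_render" <;> simp
        have hsf : PySem.Str.startswith v "mesh_" = false := by revert hs; cases PySem.Str.startswith v "mesh_" <;> simp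
        have e0 : pvP0 v = false := h0f
        have e1 : pvP1 v = false := by unfold pvP1 pvP0; rw [h0f, hsf]; simp
        have e2 : pvP2 v = true := by unfold pvP2 pvP0; rw [h0f, hsf]; rfl
        simp only [h0, hs, if_false, Bool.false_eq_true, ih, e0, e1, e2, if_true,
          List.append_assoc, List.singleton_append]

lemma render_block_on_p0 {x : String} (h : pvP0 x = true) : render_block x = fmt_csm x := by
  simp [pvP0] at h; simp [render_block, h]

lemma render_block_on_p1 {x : String} (h : pvP1 x = true) : render_block x = fmt_mesh x := by
  simp [pvP1, pvP0] at h; simp [render_block, h.1, h.2]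

lemma render_block_on_p2 {x : String} (h : pvP2 x = true) : render_block x = fmt_other x := by
  simp [pvP2, pvP0] at h; simp [render_block, h.1, h.2]

-- ===== VERDICT (by name: the statement is the Claim_ definition above) =====
theorem create_hybrid_view_images_section_spec : Claim_equal_create_hybrid_view_images_section := by
  intro render_images _
  unfold Spec_create_hybrid_view_images_section
  unfold create_hybrid_view_images_section create_hybrid_view_images_section_alt
  simp only [partition_fold _ [] [] [], List.nil_append, sorted2_decomp,
    PySem.List.foldl_append_singleton_eq_map, List.map_append]
  have e0 : ∀ (l : List String), (∀ y ∈ l, pvP0 y = true) →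
      l.map render_block = l.map fmt_csm :=
    fun l h => List.map_congr_left (fun x hx => render_block_on_p0 (h x hx))
  have e1 : ∀ (l : List String), (∀ y ∈ l, pvP1 y = true) →
      l.map render_block = l.map fmt_mesh :=
    fun l h => List.map_congr_left (fun x hx => render_block_on_p1 (h x hx))
  have e2 : ∀ (l : List String), (∀ y ∈ l, pvP2 y = true) →
      l.map render_block = l.map fmt_other :=
    fun l h => List.map_congr_left (fun x hx => render_block_on_p2 (h x hx))
  rw [e0 _ (fun y hy => (List.mem_filter.mp hy).2),
      e1 _ (fun y hy => (List.mem_filter.mp ((PySem.List.mem_sorted _ _ _ _).mp hy)).2),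
      e2 _ (fun y hy => (List.mem_filter.mp hy).2)]
  simp [List.append_assoc]
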